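-- pv_equiv track=rewrite | github.com/AnshuKumari999/final_assigement | 5.py | daily_participants
-- ===== SOURCE A (Python) =====
-- def daily_participants(participants_list):
--     dic = {}
--     l = []
--     a = []
--     for i in range(len(participants_list)):
--         l.append(0)
--     for i in range(len(participants_list)):
--         for j in range(len(participants_list[i])):
--             if participants_list[i][j] not in dic:
--                 dic[participants_list[i][j]] = 0
--
--     for name in dic:
--         flag = 0
--         for i in range(len(participants_list)):
--             if name not in participants_list[i]:
--                 flag = 1
--         if flag == 0:
--             a.append(name)
--
--     return a
-- ===== SOURCE B (Python) =====
-- def daily_participants(participants_list):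
--     # One pass with a per-day dedup and a containment counter, instead of
--     # scanning every day again for every distinct name.
--     n = len(participants_list)
--     counts = {}
--     order = []
--     for day in participants_list:
--         for name in dict.fromkeys(day):
--             if name in counts:
--                 counts[name] += 1
--             else:
--                 counts[name] = 1
--                 order.append(name)
--     return [name for name in order if counts[name] == n]
-- ===== Notes on version B (the rewrite author's own statement) =====
-- stated objective: faster
-- what changed: A re-scans every day for every distinct name (nested membership scans); B makes one pass keeping a counter of how many days contain each name (deduplicated per day) plus first-appearance order, then filters names whose count equals the number of days.
import Mathlib
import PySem

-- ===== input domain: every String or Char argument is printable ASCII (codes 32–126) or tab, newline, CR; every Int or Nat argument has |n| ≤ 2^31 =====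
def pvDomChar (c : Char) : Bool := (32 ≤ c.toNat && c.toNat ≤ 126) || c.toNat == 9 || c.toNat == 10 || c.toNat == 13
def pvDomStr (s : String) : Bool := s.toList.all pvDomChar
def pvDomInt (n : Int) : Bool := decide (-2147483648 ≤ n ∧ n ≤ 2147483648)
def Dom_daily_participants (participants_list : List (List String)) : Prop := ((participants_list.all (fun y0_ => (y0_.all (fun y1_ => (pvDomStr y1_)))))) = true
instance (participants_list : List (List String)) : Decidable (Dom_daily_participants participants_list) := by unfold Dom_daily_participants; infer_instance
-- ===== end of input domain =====

-- B replaces A's per-name re-scan of all days by a single counting pass over the days (faster).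
-- ===== PORT A =====
-- (A also builds a list 'l' of zeros that it never reads; it is dropped as dead code.)
def daily_participants (participants_list : List (List String)) : List String :=
  (participants_list.foldl (fun d row =>
      row.foldl (fun (d : PySem.Dict String Int) name =>
        if !d.contains name then d.insert name 0 else d) d)
    PySem.Dict.empty).keys.foldl
    (fun a name =>
      if (participants_list.foldl
            (fun (f : Int) row => if name ∉ row then 1 else f) 0) = 0
      then a ++ [name] else a) []

-- ===== PORT B =====
def daily_participants_alt (participants_list : List (List String)) : List String :=
  let st :=
    participants_list.foldl (fun (st : PySem.Dict String Int × List String) day =>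
      (PySem.List.dedup day).foldl (fun st name =>
        if st.1.contains name then (st.1.insert name (st.1.getD name 0 + 1), st.2)
        else (st.1.insert name 1, st.2 ++ [name])) st)
      (PySem.Dict.empty, [])
  st.2.filter (fun name => st.1.getD name 0 == (participants_list.length : Int))

-- ===== PRECONDITION & SPEC =====
def Spec_daily_participants (participants_list : List (List String)) (out : List String) : Prop := out = daily_participants_alt participants_list
instance (participants_list : List (List String)) (out : List String) : Decidable (Spec_daily_participants participants_list out) := by unfold Spec_daily_participants; infer_instance

-- ===== CLAIM (what is proved, stated in full; the proofs are below) =====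
def Claim_equal_daily_participants : Prop := ∀ (participants_list : List (List String)), Dom_daily_participants participants_list → Spec_daily_participants participants_list (daily_participants participants_list)

-- ===== LEMMAS AND PROOFS =====

-- A's flag loop: 0 iff every day contains the name.
theorem pv_flag_eq (pl : List (List String)) (name : String) (init : Int) :
    pl.foldl (fun (f : Int) row => if name ∉ row then 1 else f) init
      = if pl.all (fun row => decide (name ∈ row)) then init else 1 := by
  induction pl generalizing init with
  | nil => simp
  | cons r t ih =>
    rw [List.foldl_cons]
    by_cases h : name ∈ r
    · rw [if_neg (by simpa using h), ih]
      simp [h]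
    · rw [if_pos (by simpa using h), ih]
      simp [h]

-- A's dic-building loop collects the keys dedup-style.
theorem pv_keys_inner (row : List String) (d : PySem.Dict String Int) :
    (row.foldl (fun d name => if !d.contains name then d.insert name 0 else d) d).keys
      = PySem.Set.update d.keys row := by
  induction row generalizing d with
  | nil => simp [PySem.Set.update]
  | cons x t ih =>
    by_cases h : d.contains x
    · rw [List.foldl_cons, if_neg (by simp [h]), ih]
      have hx : x ∈ d.keys := (PySem.Dict.contains_iff_mem_keys d x).mp h
      simp [PySem.Set.update, PySem.Set.add, PySem.Set.contains, hx]
    · rw [List.foldl_cons, if_pos (by simp [h]), ih,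
        PySem.Dict.keys_insert_of_not_contains d 0 (by simpa using h)]
      have hx : x ∉ d.keys := fun hm => h ((PySem.Dict.contains_iff_mem_keys d x).mpr hm)
      simp [PySem.Set.update, PySem.Set.add, PySem.Set.contains, hx]

theorem pv_keys_outer (pl : List (List String)) (d : PySem.Dict String Int) :
    (pl.foldl (fun d row =>
        row.foldl (fun d name => if !d.contains name then d.insert name 0 else d) d) d).keys
      = PySem.Set.update d.keys pl.flatten := by
  induction pl generalizing d with
  | nil => simp [PySem.Set.update]
  | cons r t ih =>
    rw [List.foldl_cons, ih, pv_keys_inner, List.flatten_cons]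
    simp [PySem.Set.update, List.foldl_append]

-- characterisation of A
theorem pv_A_eq (pl : List (List String)) :
    daily_participants pl
      = (PySem.List.dedup pl.flatten).filter
          (fun name => pl.all (fun row => decide (name ∈ row))) := by
  unfold daily_participants
  rw [pv_keys_outer, PySem.Dict.keys_empty, PySem.Set.update_nil_left]
  have hfun : (fun (a : List String) name =>
      if (pl.foldl (fun (f : Int) row => if name ∉ row then 1 else f) 0) = 0
      then a ++ [name] else a)
      = fun a name => if pl.all (fun row => decide (name ∈ row)) then a ++ [name] else a := by
    funext a name
    rw [pv_flag_eq]
    split <;> simp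
  rw [hfun, PySem.List.foldl_append_if_eq_filter]
  simp [PySem.List.dedup]

-- B's loop body, named so the invariant lemmas can speak about it.
def pvStep (st : PySem.Dict String Int × List String) (name : String) :
    PySem.Dict String Int × List String :=
  if st.1.contains name then (st.1.insert name (st.1.getD name 0 + 1), st.2)
  else (st.1.insert name 1, st.2 ++ [name])

-- invariant carried across the days already processed
def pvGood (seen : List (List String)) (st : PySem.Dict String Int × List String) : Prop :=
  st.2 = PySem.List.dedup seen.flatten ∧
  ∀ name : String,
    st.1.get? name =
      if name ∈ seen.flatten
      then some ((seen.countP (fun row => decide (name ∈ row)) : Int))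
      else none

-- inner loop: a Nodup batch of names bumps each count by one and appends the fresh names.
theorem pv_inner (ns : List String) (hnd : ns.Nodup)
    (st : PySem.Dict String Int × List String)
    (h2 : ∀ name : String, (st.1.get? name).isSome ↔ name ∈ st.2) :
    (ns.foldl pvStep st).2 = st.2 ++ ns.filter (fun x => !decide (x ∈ st.2)) ∧
    ∀ name : String,
      (ns.foldl pvStep st).1.get? name =
        if name ∈ ns then some (st.1.getD name 0 + 1) else st.1.get? name := by
  induction ns generalizing st with
  | nil => simp
  | cons x t ih =>
    obtain ⟨hx, hnd'⟩ := List.nodup_cons.mp hnd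
    rw [List.foldl_cons]
    by_cases hc : st.1.contains x
    · have hxs : x ∈ st.2 :=
        (h2 x).mp (by rw [← PySem.Dict.contains_eq_isSome_get?]; exact hc)
      have hstep : pvStep st x = (st.1.insert x (st.1.getD x 0 + 1), st.2) := by
        simp [pvStep, hc]
      rw [hstep]
      have h2' : ∀ name : String,
          ((st.1.insert x (st.1.getD x 0 + 1)).get? name).isSome ↔ name ∈ st.2 := by
        intro name
        by_cases hxn : name = x
        · subst hxn; simp [PySem.Dict.get?_insert_self, hxs]
        · rw [PySem.Dict.get?_insert_of_ne _ _ hxn]; exact h2 name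
      obtain ⟨ha, hb⟩ := ih hnd' (st.1.insert x (st.1.getD x 0 + 1), st.2) h2'
      refine ⟨by rw [ha]; congr 1; simp [hxs], ?_⟩
      intro name
      rw [hb name]
      by_cases hn : name = x
      · subst hn
        simp [hx, PySem.Dict.get?_insert_self]
      · rw [PySem.Dict.get?_insert_of_ne _ _ hn]
        by_cases hnt : name ∈ t
        · simp [hnt, hn, PySem.Dict.getD_insert_of_ne _ _ _ hn]
        · simp [hnt, hn]
    · have hxs : x ∉ st.2 := fun hm => by
        have := (h2 x).mpr hm
        rw [← PySem.Dict.contains_eq_isSome_get?] at this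
        exact hc this
      have hstep : pvStep st x = (st.1.insert x 1, st.2 ++ [x]) := by
        simp [pvStep, hc]
      rw [hstep]
      have h2' : ∀ name : String,
          ((st.1.insert x 1).get? name).isSome ↔ name ∈ st.2 ++ [x] := by
        intro name
        by_cases hxn : name = x
        · subst hxn; simp [PySem.Dict.get?_insert_self]
        · rw [PySem.Dict.get?_insert_of_ne _ _ hxn]; simp [hxn, h2 name]
      obtain ⟨ha, hb⟩ := ih hnd' (st.1.insert x 1, st.2 ++ [x]) h2'
      constructor
      · rw [ha]
        simp only [List.append_assoc, List.singleton_append, List.filter_cons, hxs,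
          decide_false, Bool.not_false, if_pos]
        congr 2
        apply List.filter_congr
        intro y hy
        have hyx : y ≠ x := fun h => hx (h ▸ hy)
        simp [List.mem_append, hyx]
      · intro name
        rw [hb name]
        by_cases hn : name = x
        · subst hn
          have hg0 : st.1.getD name 0 = 0 :=
            PySem.Dict.getD_of_not_contains _ _ (by simpa using hc)
          simp [hx, PySem.Dict.get?_insert_self, hg0]
        · rw [PySem.Dict.get?_insert_of_ne _ _ hn]
          by_cases hnt : name ∈ t
          · simp [hnt, hn, PySem.Dict.getD_insert_of_ne _ _ _ hn]
          · simp [hnt, hn]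

-- splitting a dedup across an append
theorem pv_dedup_append (a b : List String) :
    PySem.List.dedup (a ++ b)
      = PySem.List.dedup a
        ++ (PySem.List.dedup b).filter (fun x => !decide (x ∈ PySem.List.dedup a)) := by
  have h1 : PySem.List.dedup (a ++ b) = PySem.Set.update (PySem.List.dedup a) b := by
    simp [PySem.List.dedup, PySem.Set.ofList, PySem.Set.update, List.foldl_append]
  rw [h1, PySem.Set.update_eq_append_filter]
  congr 1
  apply List.filter_congr
  intro y _
  simp [PySem.Set.contains, PySem.List.dedup]

-- outer loop: the invariant is preserved day by day.
theorem pv_outer (pl : List (List String)) (seen : List (List String))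
    (st : PySem.Dict String Int × List String) (h : pvGood seen st) :
    pvGood (seen ++ pl)
      (pl.foldl (fun st day => (PySem.List.dedup day).foldl pvStep st) st) := by
  induction pl generalizing seen st with
  | nil => simpa using h
  | cons day t ih =>
    obtain ⟨h1, h2⟩ := h
    have hiso : ∀ name : String, (st.1.get? name).isSome ↔ name ∈ st.2 := by
      intro name
      rw [h1, PySem.List.mem_dedup, h2 name]
      by_cases hs : name ∈ seen.flatten <;> simp [hs]
    obtain ⟨ha, hb⟩ := pv_inner (PySem.List.dedup day) (PySem.List.nodup_dedup day) st hiso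
    rw [List.foldl_cons]
    have hgood : pvGood (seen ++ [day]) ((PySem.List.dedup day).foldl pvStep st) := by
      constructor
      · rw [ha, h1, List.flatten_append]
        simp only [List.flatten_cons, List.flatten_nil, List.append_nil]
        rw [pv_dedup_append]
      · intro name
        rw [hb name]
        have hmem : name ∈ (seen ++ [day]).flatten ↔ name ∈ seen.flatten ∨ name ∈ day := by
          simp [List.flatten_append]
        by_cases hd : name ∈ day
        · have hdd : name ∈ PySem.List.dedup day := (PySem.List.mem_dedup _ _).mpr hd
          have hcount : (seen ++ [day]).countP (fun row => decide (name ∈ row))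
              = seen.countP (fun row => decide (name ∈ row)) + 1 := by
            simp [List.countP_append, hd]
          rw [if_pos hdd, if_pos (hmem.mpr (Or.inr hd)), hcount,
            PySem.Dict.getD_eq_get?_getD, h2 name]
          by_cases hs : name ∈ seen.flatten
          · rw [if_pos hs]
            simp only [Option.getD_some, Option.some.injEq]
            push_cast; ring
          · rw [if_neg hs]
            have hc0 : seen.countP (fun row => decide (name ∈ row)) = 0 := by
              rw [List.countP_eq_zero]
              intro row hrow
              simp only [decide_eq_true_eq]
              exact fun hn => hs (List.mem_flatten.mpr ⟨row, hrow, hn⟩)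
            simp [hc0]
        · have hdd : name ∉ PySem.List.dedup day :=
            fun hm => hd ((PySem.List.mem_dedup _ _).mp hm)
          have hcount : (seen ++ [day]).countP (fun row => decide (name ∈ row))
              = seen.countP (fun row => decide (name ∈ row)) := by
            simp [List.countP_append, hd]
          rw [if_neg hdd, h2 name, hcount]
          have : (name ∈ (seen ++ [day]).flatten) ↔ name ∈ seen.flatten := by
            rw [hmem]; simp [hd]
          by_cases hs : name ∈ seen.flatten
          · rw [if_pos hs, if_pos (this.mpr hs)]
          · rw [if_neg hs, if_neg (fun hm => hs (this.mp hm))]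
    have := ih (seen ++ [day]) _ hgood
    simpa using this

-- characterisation of B
theorem pv_B_eq (pl : List (List String)) :
    daily_participants_alt pl
      = (PySem.List.dedup pl.flatten).filter
          (fun name => pl.all (fun row => decide (name ∈ row))) := by
  have h0 : pvGood [] ((PySem.Dict.empty : PySem.Dict String Int), ([] : List String)) := by
    constructor
    · simp [PySem.List.dedup, PySem.Set.ofList]
    · intro name; simp [PySem.Dict.get?_empty]
  obtain ⟨h1, h2⟩ := pv_outer pl [] _ h0
  simp only [List.nil_append] at h1 h2
  rw [show daily_participants_alt pl
      = ((pl.foldl (fun st day => (PySem.List.dedup day).foldl pvStep st)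
          (PySem.Dict.empty, [])).2).filter
          (fun name => (pl.foldl (fun st day => (PySem.List.dedup day).foldl pvStep st)
            (PySem.Dict.empty, [])).1.getD name 0 == (pl.length : Int)) from rfl]
  rw [h1]
  apply List.filter_congr
  intro name hname
  have hmem : name ∈ pl.flatten := (PySem.List.mem_dedup _ _).mp hname
  rw [PySem.Dict.getD_eq_get?_getD, h2 name, if_pos hmem]
  simp only [Option.getD_some]
  rw [Bool.eq_iff_iff, beq_iff_eq, List.all_eq_true]
  constructor
  · intro hcnt
    have hc : pl.countP (fun row => decide (name ∈ row)) = pl.length := by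
      exact_mod_cast hcnt
    intro row hrow
    simpa using (List.countP_eq_length).mp hc row hrow
  · intro hall
    have hc : pl.countP (fun row => decide (name ∈ row)) = pl.length :=
      List.countP_eq_length.mpr (fun row hrow => by simpa using hall row hrow)
    exact_mod_cast hc

-- ===== VERDICT (by name: the statement is the Claim_ definition above) =====
theorem daily_participants_spec : Claim_equal_daily_participants := by
  intro pl _
  unfold Spec_daily_participants
  rw [pv_A_eq, pv_B_eq]
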